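-- pv_equiv track=rewrite | github.com/EnvyW6567/CodingTestAlgorithm | lie.py | solution
-- ===== SOURCE A (Python) =====
-- from collections import defaultdict
--
-- def find_all_truth_knowers(relations, truth_knowers, member):
--     if member not in truth_knowers:
--         return truth_knowers
--
--     for r_member in relations[member]:
--         if r_member not in truth_knowers:
--             truth_knowers[r_member] = True
--             truth_knowers = find_all_truth_knowers(relations, truth_knowers, r_member)
--
--     return truth_knowers
--
-- def solution(truths, parties):
--     answer = 0
--     truth_knowers = {}
--     members_dict = {}
--     relations = defaultdict(list)
--
--     if not truths:
--         return len(parties)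
--
--     for knower in truths:
--         truth_knowers[knower] = True
--
--     for members in parties:
--         for i in range(len(members)):
--             members_dict[members[i]] = True
--             for j in range(i + 1, len(members)):
--                 relations[members[i]].append(members[j])
--                 relations[members[j]].append(members[i])
--
--     for member in members_dict:
--         truth_knowers = find_all_truth_knowers(relations, truth_knowers, member)
--
--     for members in parties:
--         lie = True
--         for member in members:
--             if member in truth_knowers:
--                 lie = False  # 진실을 말해야 함
--                 break
--
--         if lie:
--             answer += 1
--
--     return answer
-- ===== SOURCE B (Python) =====
-- def solution(truths, parties):
--     known = set(truths)
--     changed = True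
--     while changed:
--         changed = False
--         for party in parties:
--             if not known.isdisjoint(party) and not known.issuperset(party):
--                 known.update(party)
--                 changed = True
--     return sum(1 for party in parties if known.isdisjoint(party))
-- ===== Notes on version B (the rewrite author's own statement) =====
-- stated objective: faster
-- what changed: B drops A's O(sum |party|^2) pairwise adjacency lists and recursive DFS entirely; it keeps one set of truth-knowers and repeatedly absorbs any party overlapping it until a fixpoint, then counts the parties disjoint from the set.
import Mathlib
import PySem

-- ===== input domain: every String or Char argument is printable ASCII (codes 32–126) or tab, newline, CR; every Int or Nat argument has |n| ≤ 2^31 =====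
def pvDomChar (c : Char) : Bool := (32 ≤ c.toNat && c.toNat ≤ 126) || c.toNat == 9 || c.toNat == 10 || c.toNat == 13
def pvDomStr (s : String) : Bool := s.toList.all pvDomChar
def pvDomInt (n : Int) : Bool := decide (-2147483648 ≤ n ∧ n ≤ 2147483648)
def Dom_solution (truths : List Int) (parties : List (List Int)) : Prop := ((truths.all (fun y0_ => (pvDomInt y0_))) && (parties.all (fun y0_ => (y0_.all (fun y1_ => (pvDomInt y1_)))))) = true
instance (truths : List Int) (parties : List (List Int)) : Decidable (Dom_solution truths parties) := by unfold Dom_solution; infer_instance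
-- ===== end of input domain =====

-- B replaces A's pairwise adjacency lists + recursive DFS by set saturation over whole
-- parties (absorb any party overlapping the known set until fixpoint), then counts the
-- parties disjoint from the set; same return value, no edge lists built.

-- ===== PORT A =====
-- find_all_truth_knowers: Python recursion ported with fuel; the fuel chosen by the
-- caller is provably sufficient (each nested call inserts a fresh member), see lemmas.
mutual
def solAFindAll (rel : PySem.Dict Int (List Int)) : Nat → PySem.Dict Int Bool → Int → PySem.Dict Int Bool
  | 0, S, _ => S
  | fuel+1, S, m =>
    if (S.get? m).isSome then solAGo rel fuel S (rel.getD m []) else S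
  termination_by fuel S m => (fuel, 0, 0)

def solAGo (rel : PySem.Dict Int (List Int)) : Nat → PySem.Dict Int Bool → List Int → PySem.Dict Int Bool
  | _, S, [] => S
  | fuel, S, r :: rest =>
    if (S.get? r).isSome then solAGo rel fuel S rest
    else solAGo rel fuel (solAFindAll rel fuel (S.insert r true) r) rest
  termination_by fuel S l => (fuel, 1, l.length)
end

-- relations[a].append(b); relations[b].append(a)
def solARelPair (a b : Int) (rel : PySem.Dict Int (List Int)) : PySem.Dict Int (List Int) :=
  let rel1 := rel.insert a (rel.getD a [] ++ [b])
  rel1.insert b (rel1.getD b [] ++ [a])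

-- body of the 'for i in range(len(members))' loop (members_dict insert + inner j-loop)
def solAPartyStep (members : List Int) (st : PySem.Dict Int Bool × PySem.Dict Int (List Int)) (i : Int) :
    PySem.Dict Int Bool × PySem.Dict Int (List Int) :=
  let a := PySem.List.pyGetD members i 0
  (st.1.insert a true,
   (PySem.List.pyRange (i+1) (PySem.List.len members) 1).foldl
     (fun rel j => solARelPair a (PySem.List.pyGetD members j 0) rel) st.2)

def solABuild (parties : List (List Int)) : PySem.Dict Int Bool × PySem.Dict Int (List Int) :=
  parties.foldl (fun st members =>
    (PySem.List.pyRange 0 (PySem.List.len members) 1).foldl (solAPartyStep members) st)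
    (PySem.Dict.empty, PySem.Dict.empty)

-- the 'for member in members: if member in truth_knowers: lie = False; break' loop
def solALie (S : PySem.Dict Int Bool) : List Int → Bool
  | [] => true
  | m :: rest => if (S.get? m).isSome then false else solALie S rest

def solution (truths : List Int) (parties : List (List Int)) : Int :=
  if truths = [] then PySem.List.len parties
  else
    let S0 := truths.foldl (fun d k => d.insert k true) PySem.Dict.empty
    let mdrel := solABuild parties
    let fuel := (parties.map List.length).sum + 1
    let S := mdrel.1.keys.foldl (fun S m => solAFindAll mdrel.2 fuel S m) S0
    parties.foldl (fun ans p => if solALie S p then ans + 1 else ans) 0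

-- ===== PORT B =====
-- one 'for party in parties' pass: absorb parties overlapping the known set
def solBPass (known : PySem.Set Int) (parties : List (List Int)) : PySem.Set Int × Bool :=
  parties.foldl (fun st party =>
    if !(PySem.Set.isdisjoint st.1 party) && !(PySem.Set.issuperset st.1 party)
    then (PySem.Set.update st.1 party, true)
    else st) (known, false)

-- the 'while changed' loop; fuel is provably sufficient (each changed pass grows the set)
def solBLoop (parties : List (List Int)) : Nat → PySem.Set Int → PySem.Set Int
  | 0, k => k
  | fuel+1, k =>
    let st := solBPass k parties
    if st.2 then solBLoop parties fuel st.1 else st.1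

def solution_alt (truths : List Int) (parties : List (List Int)) : Int :=
  let known := PySem.Set.ofList truths
  let fuel := truths.length + (parties.map List.length).sum + 1
  let k := solBLoop parties fuel known
  parties.foldl (fun acc party => if PySem.Set.isdisjoint k party then acc + 1 else acc) 0

-- ===== PRECONDITION & SPEC =====
def Spec_solution (truths : List Int) (parties : List (List Int)) (out : Int) : Prop := out = solution_alt truths parties
instance (truths : List Int) (parties : List (List Int)) (out : Int) : Decidable (Spec_solution truths parties out) := by unfold Spec_solution; infer_instance

-- ===== CLAIM (what is proved, stated in full; the proofs are below) =====
def Claim_equal_solution : Prop := ∀ (truths : List Int) (parties : List (List Int)), Dom_solution truths parties → Spec_solution truths parties (solution truths parties)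

-- ===== LEMMAS AND PROOFS =====

-- x and y sit together in some party
def PStep (parties : List (List Int)) (x y : Int) : Prop := ∃ p ∈ parties, x ∈ p ∧ y ∈ p

-- x is connected to a truth-knower
def Reach (truths : List Int) (parties : List (List Int)) (x : Int) : Prop :=
  ∃ t ∈ truths, Relation.ReflTransGen (PStep parties) t x

-- membership in A's truth_knowers dict
def amem (S : PySem.Dict Int Bool) (x : Int) : Prop := (S.get? x).isSome

theorem amem_iff_mem_keys (S : PySem.Dict Int Bool) (x : Int) : amem S x ↔ x ∈ S.keys := by
  rw [amem, Option.isSome_iff_ne_none]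
  simp [Ne, PySem.Dict.get?_eq_none_iff_not_mem_keys]

theorem amem_insert (S : PySem.Dict Int Bool) (k : Int) (v : Bool) (x : Int) :
    amem (S.insert k v) x ↔ x = k ∨ amem S x := by
  simp only [amem, PySem.Dict.get?_insert]
  split_ifs with h <;> simp [h]

-- ---- build lemmas ----

theorem relPair_mem (a b : Int) (rel : PySem.Dict Int (List Int)) (x y : Int) :
    y ∈ (solARelPair a b rel).getD x [] ↔
      y ∈ rel.getD x [] ∨ (x = a ∧ y = b) ∨ (x = b ∧ y = a) := by
  simp only [solARelPair, PySem.Dict.getD_insert]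
  split_ifs with h1 h2 h3 <;> subst_eqs <;> simp_all

theorem innerL_mem (members : List Int) (a : Int) (L : List Int) (rel : PySem.Dict Int (List Int)) (x y : Int) :
    y ∈ (L.foldl (fun rel j => solARelPair a (PySem.List.pyGetD members j 0) rel) rel).getD x [] ↔
      y ∈ rel.getD x [] ∨ ∃ j ∈ L, (x = a ∧ y = PySem.List.pyGetD members j 0) ∨ (x = PySem.List.pyGetD members j 0 ∧ y = a) := by
  induction L generalizing rel with
  | nil => simp
  | cons j L ih =>
    rw [List.foldl_cons, ih, relPair_mem]
    simp only [List.mem_cons]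
    constructor
    · rintro ((h | h | h) | ⟨j', hj', h⟩)
      · exact Or.inl h
      · exact Or.inr ⟨j, Or.inl rfl, Or.inl h⟩
      · exact Or.inr ⟨j, Or.inl rfl, Or.inr h⟩
      · exact Or.inr ⟨j', Or.inr hj', h⟩
    · rintro (h | ⟨j', (rfl | hj'), h⟩)
      · exact Or.inl (Or.inl h)
      · exact Or.inl (Or.inr h)
      · exact Or.inr ⟨j', hj', h⟩

theorem outer_md_mem (members : List Int) (L : List Int) (st : PySem.Dict Int Bool × PySem.Dict Int (List Int)) (x : Int) :
    x ∈ (L.foldl (solAPartyStep members) st).1.keys ↔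
      x ∈ st.1.keys ∨ ∃ i ∈ L, x = PySem.List.pyGetD members i 0 := by
  induction L generalizing st with
  | nil => simp
  | cons i L ih =>
    rw [List.foldl_cons, ih]
    simp only [solAPartyStep, PySem.Dict.mem_keys_insert, List.mem_cons]
    constructor
    · rintro ((rfl | h) | ⟨i', hi', h⟩)
      · exact Or.inr ⟨i, Or.inl rfl, rfl⟩
      · exact Or.inl h
      · exact Or.inr ⟨i', Or.inr hi', h⟩
    · rintro (h | ⟨i', (rfl | hi'), h⟩)
      · exact Or.inl (Or.inr h)
      · exact Or.inl (Or.inl h)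
      · exact Or.inr ⟨i', hi', h⟩

theorem outer_rel_mem (members : List Int) (L : List Int) (st : PySem.Dict Int Bool × PySem.Dict Int (List Int)) (x y : Int) :
    y ∈ (L.foldl (solAPartyStep members) st).2.getD x [] ↔
      y ∈ st.2.getD x [] ∨ ∃ i ∈ L, ∃ j ∈ PySem.List.pyRange (i+1) (PySem.List.len members) 1,
        (x = PySem.List.pyGetD members i 0 ∧ y = PySem.List.pyGetD members j 0) ∨
        (x = PySem.List.pyGetD members j 0 ∧ y = PySem.List.pyGetD members i 0) := by
  induction L generalizing st with
  | nil => simp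
  | cons i L ih =>
    rw [List.foldl_cons, ih]
    simp only [solAPartyStep]
    rw [innerL_mem]
    simp only [List.mem_cons]
    constructor
    · rintro ((h | ⟨j, hj, h⟩) | ⟨i', hi', j, hj, h⟩)
      · exact Or.inl h
      · exact Or.inr ⟨i, Or.inl rfl, j, hj, h⟩
      · exact Or.inr ⟨i', Or.inr hi', j, hj, h⟩
    · rintro (h | ⟨i', (rfl | hi'), j, hj, h⟩)
      · exact Or.inl (Or.inl h)
      · exact Or.inl (Or.inr ⟨j, hj, h⟩)
      · exact Or.inr ⟨i', hi', j, hj, h⟩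

theorem pg_nat (members : List Int) (n : Nat) (hn : n < members.length) :
    PySem.List.pyGetD members (n : Int) 0 = members[n] := by
  rw [PySem.List.pyGetD_natCast]
  exact List.getD_eq_getElem members 0 hn

theorem exists_range_iff_mem (members : List Int) (x : Int) :
    (∃ i ∈ PySem.List.pyRange 0 (PySem.List.len members) 1, x = PySem.List.pyGetD members i 0) ↔ x ∈ members := by
  constructor
  · rintro ⟨i, hi, rfl⟩
    rw [PySem.List.mem_pyRange_one] at hi
    simp only [PySem.List.len_eq] at hi
    exact PySem.List.pyGetD_mem members 0 ⟨by omega, hi.2⟩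
  · intro hx
    obtain ⟨n, hn, h⟩ := List.mem_iff_getElem.1 hx
    refine ⟨(n : Int), ?_, ?_⟩
    · rw [PySem.List.mem_pyRange_one]
      simp only [PySem.List.len_eq]
      constructor
      · positivity
      · exact_mod_cast hn
    · rw [pg_nat members n hn, h]

theorem party_md_mem (members : List Int) (st : PySem.Dict Int Bool × PySem.Dict Int (List Int)) (x : Int) :
    x ∈ ((PySem.List.pyRange 0 (PySem.List.len members) 1).foldl (solAPartyStep members) st).1.keys ↔
      x ∈ st.1.keys ∨ x ∈ members := by
  rw [outer_md_mem]
  exact or_congr Iff.rfl (exists_range_iff_mem members x)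

theorem party_rel_sub (members : List Int) (st : PySem.Dict Int Bool × PySem.Dict Int (List Int)) (x y : Int)
    (h : y ∈ ((PySem.List.pyRange 0 (PySem.List.len members) 1).foldl (solAPartyStep members) st).2.getD x []) :
    y ∈ st.2.getD x [] ∨ (x ∈ members ∧ y ∈ members) := by
  rcases (outer_rel_mem members _ st x y).1 h with h' | ⟨i, hi, j, hj, hcase⟩
  · exact Or.inl h'
  · rw [PySem.List.mem_pyRange_one] at hi hj
    simp only [PySem.List.len_eq] at hi hj
    have hmi : PySem.List.pyGetD members i 0 ∈ members :=
      PySem.List.pyGetD_mem members 0 ⟨by omega, hi.2⟩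
    have hmj : PySem.List.pyGetD members j 0 ∈ members :=
      PySem.List.pyGetD_mem members 0 ⟨by omega, hj.2⟩
    rcases hcase with ⟨rfl, rfl⟩ | ⟨rfl, rfl⟩
    · exact Or.inr ⟨hmi, hmj⟩
    · exact Or.inr ⟨hmj, hmi⟩

theorem party_rel_mono (members : List Int) (st : PySem.Dict Int Bool × PySem.Dict Int (List Int)) (x y : Int)
    (h : y ∈ st.2.getD x []) :
    y ∈ ((PySem.List.pyRange 0 (PySem.List.len members) 1).foldl (solAPartyStep members) st).2.getD x [] := by
  exact (outer_rel_mem members _ st x y).2 (Or.inl h)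

theorem party_rel_pair (members : List Int) (st : PySem.Dict Int Bool × PySem.Dict Int (List Int)) (x y : Int)
    (hx : x ∈ members) (hy : y ∈ members) (hne : x ≠ y) :
    y ∈ ((PySem.List.pyRange 0 (PySem.List.len members) 1).foldl (solAPartyStep members) st).2.getD x [] := by
  obtain ⟨i0, hi0, hxe⟩ := List.mem_iff_getElem.1 hx
  obtain ⟨j0, hj0, hye⟩ := List.mem_iff_getElem.1 hy
  apply (outer_rel_mem members _ st x y).2
  right
  have hrange : ∀ n : Nat, n < members.length → (n : Int) ∈ PySem.List.pyRange 0 (PySem.List.len members) 1 := by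
    intro n hn
    rw [PySem.List.mem_pyRange_one]
    simp only [PySem.List.len_eq]
    exact ⟨by positivity, by exact_mod_cast hn⟩
  have hij : i0 ≠ j0 := by
    rintro rfl
    exact hne (hxe.symm.trans hye)
  rcases Nat.lt_or_ge i0 j0 with hlt | hge
  · refine ⟨(i0 : Int), hrange i0 hi0, (j0 : Int), ?_, Or.inl ?_⟩
    · rw [PySem.List.mem_pyRange_one]
      simp only [PySem.List.len_eq]
      constructor
      · exact_mod_cast hlt
      · exact_mod_cast hj0
    · rw [pg_nat members i0 hi0, pg_nat members j0 hj0, hxe, hye]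
      exact ⟨rfl, rfl⟩
  · have hlt : j0 < i0 := by omega
    refine ⟨(j0 : Int), hrange j0 hj0, (i0 : Int), ?_, Or.inr ?_⟩
    · rw [PySem.List.mem_pyRange_one]
      simp only [PySem.List.len_eq]
      constructor
      · exact_mod_cast hlt
      · exact_mod_cast hi0
    · rw [pg_nat members i0 hi0, pg_nat members j0 hj0, hxe, hye]
      exact ⟨rfl, rfl⟩

theorem build_gen_md (parties : List (List Int)) (st : PySem.Dict Int Bool × PySem.Dict Int (List Int)) (x : Int) :
    x ∈ (parties.foldl (fun st members =>
      (PySem.List.pyRange 0 (PySem.List.len members) 1).foldl (solAPartyStep members) st) st).1.keys ↔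
      x ∈ st.1.keys ∨ x ∈ parties.flatten := by
  induction parties generalizing st with
  | nil => simp
  | cons p ps ih =>
    rw [List.foldl_cons, ih]
    rw [party_md_mem]
    simp only [List.flatten_cons, List.mem_append]
    tauto

theorem build_gen_rel_mono (parties : List (List Int)) (st : PySem.Dict Int Bool × PySem.Dict Int (List Int)) (x y : Int)
    (h : y ∈ st.2.getD x []) :
    y ∈ (parties.foldl (fun st members =>
      (PySem.List.pyRange 0 (PySem.List.len members) 1).foldl (solAPartyStep members) st) st).2.getD x [] := by
  induction parties generalizing st with
  | nil => exact h
  | cons p ps ih =>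
    rw [List.foldl_cons]
    exact ih _ (party_rel_mono p st x y h)

theorem build_gen_rel_sub (parties : List (List Int)) (st : PySem.Dict Int Bool × PySem.Dict Int (List Int)) (x y : Int)
    (h : y ∈ (parties.foldl (fun st members =>
      (PySem.List.pyRange 0 (PySem.List.len members) 1).foldl (solAPartyStep members) st) st).2.getD x []) :
    y ∈ st.2.getD x [] ∨ ∃ p ∈ parties, x ∈ p ∧ y ∈ p := by
  induction parties generalizing st with
  | nil => exact Or.inl h
  | cons p ps ih =>
    rw [List.foldl_cons] at h
    rcases ih _ h with h' | ⟨q, hq, hxy⟩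
    · rcases party_rel_sub p st x y h' with h'' | hxy
      · exact Or.inl h''
      · exact Or.inr ⟨p, List.mem_cons_self .., hxy⟩
    · exact Or.inr ⟨q, List.mem_cons_of_mem _ hq, hxy⟩

theorem build_gen_rel_pair (parties : List (List Int)) (st : PySem.Dict Int Bool × PySem.Dict Int (List Int))
    (p : List Int) (x y : Int) (hp : p ∈ parties) (hx : x ∈ p) (hy : y ∈ p) (hne : x ≠ y) :
    y ∈ (parties.foldl (fun st members =>
      (PySem.List.pyRange 0 (PySem.List.len members) 1).foldl (solAPartyStep members) st) st).2.getD x [] := by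
  induction parties generalizing st with
  | nil => cases hp
  | cons q ps ih =>
    rw [List.foldl_cons]
    rcases List.mem_cons.1 hp with rfl | hp'
    · exact build_gen_rel_mono ps _ x y (party_rel_pair p st x y hx hy hne)
    · exact ih _ hp'

theorem build_md_mem (parties : List (List Int)) (x : Int) :
    x ∈ (solABuild parties).1.keys ↔ x ∈ parties.flatten := by
  rw [solABuild, build_gen_md]
  simp

theorem build_rel_sub (parties : List (List Int)) (x y : Int)
    (h : y ∈ (solABuild parties).2.getD x []) : ∃ p ∈ parties, x ∈ p ∧ y ∈ p := by
  rw [solABuild] at h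
  rcases build_gen_rel_sub parties _ x y h with h' | hres
  · simp [PySem.Dict.getD_empty] at h'
  · exact hres

theorem build_rel_pair (parties : List (List Int)) (p : List Int) (x y : Int)
    (hp : p ∈ parties) (hx : x ∈ p) (hy : y ∈ p) (hne : x ≠ y) :
    y ∈ (solABuild parties).2.getD x [] := by
  rw [solABuild]
  exact build_gen_rel_pair parties _ p x y hp hx hy hne

-- ---- DFS lemmas ----

def phi (parties : List (List Int)) (S : PySem.Dict Int Bool) : Nat :=
  (parties.flatten.toFinset \ S.keys.toFinset).card

theorem phi_le_empty (parties : List (List Int)) (S : PySem.Dict Int Bool) :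
    phi parties S ≤ phi parties PySem.Dict.empty := by
  apply Finset.card_le_card
  intro a ha
  rw [Finset.mem_sdiff] at ha ⊢
  refine ⟨ha.1, ?_⟩
  simp [PySem.Dict.keys_empty]

theorem phi_mono (parties : List (List Int)) (S S' : PySem.Dict Int Bool)
    (h : ∀ x, amem S x → amem S' x) : phi parties S' ≤ phi parties S := by
  apply Finset.card_le_card
  intro a ha
  rw [Finset.mem_sdiff] at ha ⊢
  refine ⟨ha.1, fun hmem => ha.2 ?_⟩
  rw [List.mem_toFinset, ← amem_iff_mem_keys] at hmem ⊢
  exact h a hmem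

theorem phi_insert (parties : List (List Int)) (S : PySem.Dict Int Bool) (r : Int)
    (hr : r ∈ parties.flatten) (hnm : ¬ amem S r) :
    phi parties (S.insert r true) < phi parties S := by
  have hc : S.contains r = false := by
    rw [PySem.Dict.contains_eq_isSome_get?]
    simpa [amem] using hnm
  unfold phi
  rw [PySem.Dict.keys_insert_of_not_contains S true hc]
  have : (S.keys ++ [r]).toFinset = insert r S.keys.toFinset := by
    simp [List.toFinset_append, Finset.union_comm]
  rw [this, Finset.sdiff_insert]
  apply Finset.card_erase_lt_of_mem
  rw [Finset.mem_sdiff]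
  refine ⟨List.mem_toFinset.2 hr, fun hk => hnm ?_⟩
  rw [amem_iff_mem_keys]
  exact List.mem_toFinset.1 hk

-- the combined DFS specification, by induction on fuel
theorem findAll_spec (parties : List (List Int)) (rel : PySem.Dict Int (List Int))
    (R : Int → Prop) (hR : ∀ a b, R a → PStep parties a b → R b)
    (hsub : ∀ x y, y ∈ rel.getD x [] → ∃ p ∈ parties, x ∈ p ∧ y ∈ p) :
    ∀ fuel S m, phi parties S < fuel →
      (∀ x, amem S x → amem (solAFindAll rel fuel S m) x) ∧
      ((∀ x, amem S x → R x) → ∀ x, amem (solAFindAll rel fuel S m) x → R x) ∧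
      (∀ x, amem (solAFindAll rel fuel S m) x →
        amem S x ∨ ∀ y ∈ rel.getD x [], amem (solAFindAll rel fuel S m) y) ∧
      (amem S m → ∀ y ∈ rel.getD m [], amem (solAFindAll rel fuel S m) y) := by
  intro fuel
  induction fuel with
  | zero => intro S m h; omega
  | succ fuel ih =>
    have go : ∀ (l : List Int) (S : PySem.Dict Int Bool),
        (∀ r ∈ l, r ∈ parties.flatten) → phi parties S ≤ fuel →
        (∀ x, amem S x → amem (solAGo rel fuel S l) x) ∧
        ((∀ x, amem S x → R x) → (∀ r ∈ l, R r) → ∀ x, amem (solAGo rel fuel S l) x → R x) ∧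
        (∀ x, amem (solAGo rel fuel S l) x →
          amem S x ∨ ∀ y ∈ rel.getD x [], amem (solAGo rel fuel S l) y) ∧
        (∀ r ∈ l, amem (solAGo rel fuel S l) r) := by
      intro l
      induction l with
      | nil =>
        intro S _ _
        refine ⟨fun x hx => by simpa [solAGo] using hx, ?_, ?_, by simp⟩
        · intro hInv _ x hx
          exact hInv x (by simpa [solAGo] using hx)
        · intro x hx
          exact Or.inl (by simpa [solAGo] using hx)
      | cons r rest ihl =>
        intro S hflat hfuel
        by_cases hr : amem S r
        · have heq : solAGo rel fuel S (r :: rest) = solAGo rel fuel S rest := by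
            have : (S.get? r).isSome = true := hr
            simp [solAGo, this]
          obtain ⟨m1, s1, c1, a1⟩ := ihl S (fun r' hr' => hflat r' (List.mem_cons_of_mem _ hr')) hfuel
          rw [heq]
          refine ⟨m1, fun hInv hRl => s1 hInv (fun r' hr' => hRl r' (List.mem_cons_of_mem _ hr')), c1, ?_⟩
          intro r' hr'
          rcases List.mem_cons.1 hr' with rfl | hr''
          · exact m1 r' hr
          · exact a1 r' hr''
        · have heq : solAGo rel fuel S (r :: rest) =
              solAGo rel fuel (solAFindAll rel fuel (S.insert r true) r) rest := by
            have : (S.get? r).isSome = false := by simpa [amem] using hr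
            simp [solAGo, this]
          have hrM : r ∈ parties.flatten := hflat r (List.mem_cons_self ..)
          have hphi : phi parties (S.insert r true) < fuel :=
            lt_of_lt_of_le (phi_insert parties S r hrM hr) hfuel
          obtain ⟨fm, fs, fc, fself⟩ := ih (S.insert r true) r hphi
          set S1 := solAFindAll rel fuel (S.insert r true) r with hS1
          have hphi1 : phi parties S1 ≤ fuel :=
            le_trans (phi_mono parties _ _ fm) (le_of_lt hphi)
          obtain ⟨m1, s1, c1, a1⟩ := ihl S1 (fun r' hr' => hflat r' (List.mem_cons_of_mem _ hr')) hphi1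
          rw [heq]
          have hmono : ∀ x, amem S x → amem (solAGo rel fuel S1 rest) x := by
            intro x hx
            exact m1 x (fm x ((amem_insert S r true x).2 (Or.inr hx)))
          refine ⟨hmono, ?_, ?_, ?_⟩
          · intro hInv hRl x hx
            refine s1 ?_ (fun r' hr' => hRl r' (List.mem_cons_of_mem _ hr')) x hx
            intro x' hx'
            apply fs ?_ x' hx'
            intro x'' hx''
            rcases (amem_insert S r true x'').1 hx'' with hxr | hx'''
            · subst hxr
              exact hRl x'' (List.mem_cons_self ..)
            · exact hInv x'' hx'''
          · intro x hx
            rcases c1 x hx with hx1 | hcl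
            · rcases fc x hx1 with hxi | hcl1
              · rcases (amem_insert S r true x).1 hxi with hxr | hxS
                · refine Or.inr (fun y hy => m1 y ?_)
                  exact fself ((amem_insert S r true r).2 (Or.inl rfl)) y (hxr ▸ hy)
                · exact Or.inl hxS
              · exact Or.inr (fun y hy => m1 y (hcl1 y hy))
            · exact Or.inr hcl
          · intro r' hr'
            rcases List.mem_cons.1 hr' with hrr' | hr''
            · subst hrr'
              exact m1 r' (fm r' ((amem_insert S r' true r').2 (Or.inl rfl)))
            · exact a1 r' hr''
    intro S m hfuel
    have hfuel' : phi parties S ≤ fuel := by omega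
    by_cases hm : amem S m
    · have heq : solAFindAll rel (fuel + 1) S m = solAGo rel fuel S (rel.getD m []) := by
        have : (S.get? m).isSome = true := hm
        simp [solAFindAll, this]
      have hflat : ∀ r ∈ rel.getD m [], r ∈ parties.flatten := by
        intro r hrr
        obtain ⟨p, hp, _, hrp⟩ := hsub m r hrr
        exact List.mem_flatten.2 ⟨p, hp, hrp⟩
      obtain ⟨m1, s1, c1, a1⟩ := go (rel.getD m []) S hflat hfuel'
      rw [heq]
      refine ⟨m1, ?_, c1, fun _ => a1⟩
      intro hInv x hx
      refine s1 hInv ?_ x hx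
      intro r hrr
      obtain ⟨p, hp, hmp, hrp⟩ := hsub m r hrr
      exact hR m r (hInv m hm) ⟨p, hp, hmp, hrp⟩
    · have heq : solAFindAll rel (fuel + 1) S m = S := by
        have : (S.get? m).isSome = false := by simpa [amem] using hm
        simp [solAFindAll, this]
      rw [heq]
      exact ⟨fun x hx => hx, fun hInv x hx => hInv x hx, fun x hx => Or.inl hx,
        fun hm' => absurd hm' hm⟩

theorem dfs_fold_spec (parties : List (List Int)) (rel : PySem.Dict Int (List Int))
    (R : Int → Prop) (hR : ∀ a b, R a → PStep parties a b → R b)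
    (hsub : ∀ x y, y ∈ rel.getD x [] → ∃ p ∈ parties, x ∈ p ∧ y ∈ p)
    (fuel : Nat) (hfuel : phi parties PySem.Dict.empty < fuel) :
    ∀ (K : List Int) (S : PySem.Dict Int Bool),
      (∀ x, amem S x → amem (K.foldl (fun S m => solAFindAll rel fuel S m) S) x) ∧
      ((∀ x, amem S x → R x) → ∀ x, amem (K.foldl (fun S m => solAFindAll rel fuel S m) S) x → R x) ∧
      (∀ x, amem (K.foldl (fun S m => solAFindAll rel fuel S m) S) x →
        amem S x ∨ ∀ y ∈ rel.getD x [], amem (K.foldl (fun S m => solAFindAll rel fuel S m) S) y) ∧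
      (∀ m ∈ K, amem S m → ∀ y ∈ rel.getD m [], amem (K.foldl (fun S m => solAFindAll rel fuel S m) S) y) := by
  intro K
  induction K with
  | nil =>
    intro S
    exact ⟨fun x hx => hx, fun h x hx => h x hx, fun x hx => Or.inl hx, by simp⟩
  | cons m K ihK =>
    intro S
    obtain ⟨fm, fs, fc, fself⟩ := findAll_spec parties rel R hR hsub fuel S m
      (lt_of_le_of_lt (phi_le_empty parties S) hfuel)
    obtain ⟨m1, s1, c1, p1⟩ := ihK (solAFindAll rel fuel S m)
    simp only [List.foldl_cons]
    refine ⟨fun x hx => m1 x (fm x hx), fun hInv x hx => s1 (fs hInv) x hx, ?_, ?_⟩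
    · intro x hx
      rcases c1 x hx with hx1 | hcl
      · rcases fc x hx1 with hxS | hcl1
        · exact Or.inl hxS
        · exact Or.inr (fun y hy => m1 y (hcl1 y hy))
      · exact Or.inr hcl
    · intro m' hm' hSm'
      rcases List.mem_cons.1 hm' with h | h
      · exact fun y hy => m1 y (fself (h ▸ hSm') y (h ▸ hy))
      · exact p1 m' h (fm m' hSm')

theorem seed_mem (truths : List Int) (x : Int) :
    amem (truths.foldl (fun d k => d.insert k true) PySem.Dict.empty) x ↔ x ∈ truths := by
  rw [amem_iff_mem_keys, PySem.Dict.keys_foldl_insert, PySem.Dict.keys_empty,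
    PySem.Set.update_nil_left, PySem.Set.mem_ofList]

-- A's final truth_knowers dict holds exactly the connected members
theorem A_char (truths : List Int) (parties : List (List Int)) (x : Int) :
    amem ((solABuild parties).1.keys.foldl
      (fun S m => solAFindAll (solABuild parties).2 ((parties.map List.length).sum + 1) S m)
      (truths.foldl (fun d k => d.insert k true) PySem.Dict.empty)) x ↔ Reach truths parties x := by
  have hR : ∀ a b, Reach truths parties a → PStep parties a b → Reach truths parties b := by
    rintro a b ⟨t, ht, path⟩ hstep
    exact ⟨t, ht, path.tail hstep⟩
  have hfuel : phi parties PySem.Dict.empty < (parties.map List.length).sum + 1 := by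
    unfold phi
    rw [PySem.Dict.keys_empty]
    simp only [List.toFinset_nil, Finset.sdiff_empty]
    have h1 := List.toFinset_card_le parties.flatten
    have h2 : parties.flatten.length = (parties.map List.length).sum := List.length_flatten
    omega
  obtain ⟨fm, fs, fc, fp⟩ := dfs_fold_spec parties (solABuild parties).2 (Reach truths parties)
    hR (fun x y h => build_rel_sub parties x y h) _ hfuel (solABuild parties).1.keys
    (truths.foldl (fun d k => d.insert k true) PySem.Dict.empty)
  have closed : ∀ a b,
      amem ((solABuild parties).1.keys.foldl
        (fun S m => solAFindAll (solABuild parties).2 ((parties.map List.length).sum + 1) S m)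
        (truths.foldl (fun d k => d.insert k true) PySem.Dict.empty)) a →
      b ∈ (solABuild parties).2.getD a [] →
      amem ((solABuild parties).1.keys.foldl
        (fun S m => solAFindAll (solABuild parties).2 ((parties.map List.length).sum + 1) S m)
        (truths.foldl (fun d k => d.insert k true) PySem.Dict.empty)) b := by
    intro a b ha hb
    rcases fc a ha with h0 | hcl
    · obtain ⟨p, hp, hap, _⟩ := build_rel_sub parties a b hb
      have haK : a ∈ (solABuild parties).1.keys :=
        (build_md_mem parties a).2 (List.mem_flatten.2 ⟨p, hp, hap⟩)
      exact fp a haK h0 b hb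
    · exact hcl b hb
  constructor
  · intro hx
    refine fs ?_ x hx
    intro x' hx'
    exact ⟨x', (seed_mem truths x').1 hx', Relation.ReflTransGen.refl⟩
  · rintro ⟨t, ht, path⟩
    induction path with
    | refl => exact fm t ((seed_mem truths t).2 ht)
    | @tail b c path hstep ihp =>
      obtain ⟨p, hp, hb, hc⟩ := hstep
      by_cases hbc : b = c
      · exact hbc ▸ ihp
      · exact closed b c ihp (build_rel_pair parties p b c hp hb hc hbc)

-- ---- B-side lemmas ----

-- the loop body of solBPass, named for the proofs
def bbody : PySem.Set Int × Bool → List Int → PySem.Set Int × Bool := fun st party =>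
  if !(PySem.Set.isdisjoint st.1 party) && !(PySem.Set.issuperset st.1 party)
  then (PySem.Set.update st.1 party, true)
  else st

theorem solBPass_eq (k : PySem.Set Int) (parties : List (List Int)) :
    solBPass k parties = parties.foldl bbody (k, false) := rfl

theorem bbody_cond (st : PySem.Set Int × Bool) (party : List Int)
    (h : (!(PySem.Set.isdisjoint st.1 party) && !(PySem.Set.issuperset st.1 party)) = true) :
    (∃ w ∈ st.1, w ∈ party) ∧ ∃ y ∈ party, y ∉ st.1 := by
  rw [Bool.and_eq_true, Bool.not_eq_true', Bool.not_eq_true'] at h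
  constructor
  · by_contra hc
    push Not at hc
    exact absurd ((PySem.Set.isdisjoint_iff st.1 party).2 hc) (by simp [h.1])
  · by_contra hc
    push Not at hc
    exact absurd ((PySem.Set.issuperset_iff st.1 party).2 hc) (by simp [h.2])

theorem bfold_mono (ps : List (List Int)) :
    ∀ (st : PySem.Set Int × Bool) (x : Int), x ∈ st.1 → x ∈ (ps.foldl bbody st).1 := by
  induction ps with
  | nil => exact fun st x hx => hx
  | cons p ps ih =>
    intro st x hx
    rw [List.foldl_cons]
    apply ih
    unfold bbody
    split_ifs
    · exact (PySem.Set.mem_update st.1 p x).2 (Or.inl hx)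
    · exact hx

theorem bfold_nodup (ps : List (List Int)) :
    ∀ (st : PySem.Set Int × Bool), st.1.Nodup → (ps.foldl bbody st).1.Nodup := by
  induction ps with
  | nil => exact fun st h => h
  | cons p ps ih =>
    intro st h
    rw [List.foldl_cons]
    apply ih
    unfold bbody
    split_ifs
    · exact PySem.Set.nodup_update st.1 p h
    · exact h

theorem bfold_sub (ps : List (List Int)) (U : List Int) (hP : ∀ q ∈ ps, ∀ x ∈ q, x ∈ U) :
    ∀ (st : PySem.Set Int × Bool), (∀ x ∈ st.1, x ∈ U) → ∀ x ∈ (ps.foldl bbody st).1, x ∈ U := by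
  induction ps with
  | nil => exact fun st h => h
  | cons p ps ih =>
    intro st h
    rw [List.foldl_cons]
    apply ih (fun q hq => hP q (List.mem_cons_of_mem _ hq))
    unfold bbody
    split_ifs
    · intro x hx
      rcases (PySem.Set.mem_update st.1 p x).1 hx with hx' | hx'
      · exact h x hx'
      · exact hP p (List.mem_cons_self ..) x hx'
    · exact h

theorem bfold_sound (truths : List Int) (parties : List (List Int)) (ps : List (List Int))
    (hps : ∀ q ∈ ps, q ∈ parties) :
    ∀ (st : PySem.Set Int × Bool), (∀ x ∈ st.1, Reach truths parties x) →
      ∀ x ∈ (ps.foldl bbody st).1, Reach truths parties x := by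
  induction ps with
  | nil => exact fun st h => h
  | cons p ps ih =>
    intro st h
    rw [List.foldl_cons]
    apply ih (fun q hq => hps q (List.mem_cons_of_mem _ hq))
    unfold bbody
    split_ifs with hcond
    · intro x hx
      rcases (PySem.Set.mem_update st.1 p x).1 hx with hx' | hx'
      · exact h x hx'
      · obtain ⟨⟨w, hw, hwp⟩, _⟩ := bbody_cond st p hcond
        obtain ⟨t, ht, path⟩ := h w hw
        exact ⟨t, ht, path.tail ⟨p, hps p (List.mem_cons_self ..), hwp, hx'⟩⟩
    · exact h

theorem bfold_len_mono (ps : List (List Int)) :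
    ∀ (st : PySem.Set Int × Bool), st.1.length ≤ (ps.foldl bbody st).1.length := by
  induction ps with
  | nil => exact fun st => le_refl _
  | cons p ps ih =>
    intro st
    rw [List.foldl_cons]
    refine le_trans ?_ (ih (bbody st p))
    unfold bbody
    split_ifs
    · rw [PySem.Set.update_eq_append_filter, List.length_append]
      omega
    · exact le_refl _

theorem bfold_true (ps : List (List Int)) :
    ∀ (st : PySem.Set Int × Bool), st.2 = true → (ps.foldl bbody st).2 = true := by
  induction ps with
  | nil => exact fun st h => h
  | cons p ps ih =>
    intro st h
    rw [List.foldl_cons]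
    apply ih
    unfold bbody
    split_ifs
    · rfl
    · exact h

theorem bfold_false (ps : List (List Int)) :
    ∀ (st : PySem.Set Int × Bool), (ps.foldl bbody st).2 = false →
      ps.foldl bbody st = st ∧
        ∀ p ∈ ps, PySem.Set.isdisjoint st.1 p = true ∨ PySem.Set.issuperset st.1 p = true := by
  induction ps with
  | nil => exact fun st h => ⟨rfl, by simp⟩
  | cons p ps ih =>
    intro st h
    rw [List.foldl_cons] at h ⊢
    by_cases hcond : (!(PySem.Set.isdisjoint st.1 p) && !(PySem.Set.issuperset st.1 p)) = true
    · exfalso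
      have hb : bbody st p = (PySem.Set.update st.1 p, true) := by
        unfold bbody
        rw [if_pos hcond]
      rw [hb] at h
      have := bfold_true ps (PySem.Set.update st.1 p, true) rfl
      rw [this] at h
      exact absurd h (by simp)
    · have hb : bbody st p = st := by
        unfold bbody
        rw [if_neg hcond]
      rw [hb] at h ⊢
      obtain ⟨h1, h2⟩ := ih st h
      refine ⟨h1, ?_⟩
      intro q hq
      rcases List.mem_cons.1 hq with rfl | hq'
      · cases hd : PySem.Set.isdisjoint st.1 q with
        | true => exact Or.inl rfl
        | false =>
          cases hs : PySem.Set.issuperset st.1 q with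
          | true => exact Or.inr rfl
          | false => exact absurd (by rw [hd, hs]; rfl) hcond
      · exact h2 q hq'

theorem update_strict (s : PySem.Set Int) (p : List Int) (y : Int)
    (hy : y ∈ p) (hny : y ∉ s) : s.length < (PySem.Set.update s p).length := by
  rw [PySem.Set.update_eq_append_filter, List.length_append]
  have hcf : s.contains y = false := by
    cases hcb : s.contains y
    · rfl
    · exact absurd ((PySem.Set.contains_iff s y).1 hcb) hny
  have hmem : y ∈ List.filter (fun z => !s.contains z) (PySem.Set.ofList p) := by
    rw [List.mem_filter]
    exact ⟨(PySem.Set.mem_ofList p y).2 hy, by rw [hcf]; rfl⟩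
  have := List.length_pos_of_mem hmem
  omega

theorem bfold_grow (ps : List (List Int)) :
    ∀ (st : PySem.Set Int × Bool), st.2 = false → (ps.foldl bbody st).2 = true →
      st.1.length < (ps.foldl bbody st).1.length := by
  induction ps with
  | nil =>
    intro st h1 h2
    rw [List.foldl_nil] at h2
    rw [h1] at h2
    cases h2
  | cons p ps ih =>
    intro st h1 h2
    rw [List.foldl_cons] at h2 ⊢
    by_cases hcond : (!(PySem.Set.isdisjoint st.1 p) && !(PySem.Set.issuperset st.1 p)) = true
    · have hb : bbody st p = (PySem.Set.update st.1 p, true) := by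
        unfold bbody
        rw [if_pos hcond]
      rw [hb]
      obtain ⟨_, y, hyp, hyn⟩ := bbody_cond st p hcond
      exact lt_of_lt_of_le (update_strict st.1 p y hyp hyn)
        (bfold_len_mono ps (PySem.Set.update st.1 p, true))
    · have hb : bbody st p = st := by
        unfold bbody
        rw [if_neg hcond]
      rw [hb] at h2 ⊢
      exact ih st h1 h2

theorem pass_mono (parties : List (List Int)) (k : PySem.Set Int) (x : Int)
    (h : x ∈ k) : x ∈ (solBPass k parties).1 := by
  rw [solBPass_eq]
  exact bfold_mono parties (k, false) x h

theorem pass_nodup (parties : List (List Int)) (k : PySem.Set Int) (h : k.Nodup) :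
    (solBPass k parties).1.Nodup := by
  rw [solBPass_eq]
  exact bfold_nodup parties (k, false) h

theorem pass_sub (parties : List (List Int)) (k : PySem.Set Int) (U : List Int)
    (hU : ∀ x ∈ k, x ∈ U) (hP : ∀ x ∈ parties.flatten, x ∈ U) :
    ∀ x ∈ (solBPass k parties).1, x ∈ U := by
  rw [solBPass_eq]
  exact bfold_sub parties U (fun q hq x hx => hP x (List.mem_flatten.2 ⟨q, hq, hx⟩)) (k, false) hU

theorem pass_sound (truths : List Int) (parties : List (List Int)) (k : PySem.Set Int)
    (hInv : ∀ x ∈ k, Reach truths parties x) :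
    ∀ x ∈ (solBPass k parties).1, Reach truths parties x := by
  rw [solBPass_eq]
  exact bfold_sound truths parties parties (fun q hq => hq) (k, false) hInv

theorem pass_false (parties : List (List Int)) (k : PySem.Set Int)
    (h : (solBPass k parties).2 = false) :
    (solBPass k parties).1 = k ∧
      ∀ p ∈ parties, PySem.Set.isdisjoint k p = true ∨ PySem.Set.issuperset k p = true := by
  rw [solBPass_eq] at h ⊢
  obtain ⟨h1, h2⟩ := bfold_false parties (k, false) h
  exact ⟨by rw [h1], h2⟩

theorem pass_true_length (parties : List (List Int)) (k : PySem.Set Int)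
    (h : (solBPass k parties).2 = true) : k.length < (solBPass k parties).1.length := by
  rw [solBPass_eq] at h ⊢
  exact bfold_grow parties (k, false) rfl h

theorem loop_spec (truths : List Int) (parties : List (List Int)) (U : List Int)
    (hP : ∀ x ∈ parties.flatten, x ∈ U) :
    ∀ (fuel : Nat) (k : PySem.Set Int), k.Nodup → (∀ x ∈ k, x ∈ U) →
      U.toFinset.card < fuel + k.length →
      (∀ x ∈ k, x ∈ solBLoop parties fuel k) ∧
      ((∀ x ∈ k, Reach truths parties x) → ∀ x ∈ solBLoop parties fuel k, Reach truths parties x) ∧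
      (∀ p ∈ parties, PySem.Set.isdisjoint (solBLoop parties fuel k) p = true ∨
        PySem.Set.issuperset (solBLoop parties fuel k) p = true) := by
  intro fuel
  induction fuel with
  | zero =>
    intro k hnd hU hcard
    exfalso
    have h1 : k.toFinset.card = k.length := List.toFinset_card_of_nodup hnd
    have h2 : k.toFinset ⊆ U.toFinset := by
      intro a ha
      rw [List.mem_toFinset] at ha ⊢
      exact hU a ha
    have := Finset.card_le_card h2
    omega
  | succ fuel ih =>
    intro k hnd hU hcard
    cases hch : (solBPass k parties).2 with
    | true =>
      have hlen := pass_true_length parties k hch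
      obtain ⟨l1, l2, l3⟩ := ih (solBPass k parties).1 (pass_nodup parties k hnd)
        (pass_sub parties k U hU hP) (by omega)
      have heq : solBLoop parties (fuel + 1) k = solBLoop parties fuel (solBPass k parties).1 := by
        simp only [solBLoop, hch, if_true]
      rw [heq]
      exact ⟨fun x hx => l1 x (pass_mono parties k x hx),
        fun hInv => l2 (pass_sound truths parties k hInv), l3⟩
    | false =>
      obtain ⟨h1, h2⟩ := pass_false parties k hch
      have heq : solBLoop parties (fuel + 1) k = k := by
        simp only [solBLoop, hch]
        exact h1
      rw [heq]
      exact ⟨fun x hx => hx, fun hInv => hInv, h2⟩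

-- B's final set holds exactly the connected members
theorem B_char (truths : List Int) (parties : List (List Int)) (x : Int) :
    x ∈ solBLoop parties (truths.length + (parties.map List.length).sum + 1) (PySem.Set.ofList truths) ↔
      Reach truths parties x := by
  have hP : ∀ z ∈ parties.flatten, z ∈ truths ++ parties.flatten :=
    fun z hz => List.mem_append_right _ hz
  have hcard : (truths ++ parties.flatten).toFinset.card <
      (truths.length + (parties.map List.length).sum + 1) + (PySem.Set.ofList truths).length := by
    have h1 := List.toFinset_card_le (truths ++ parties.flatten)
    rw [List.length_append] at h1
    have h2 : parties.flatten.length = (parties.map List.length).sum := List.length_flatten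
    omega
  obtain ⟨l1, l2, l3⟩ := loop_spec truths parties (truths ++ parties.flatten) hP
    (truths.length + (parties.map List.length).sum + 1) (PySem.Set.ofList truths)
    (PySem.Set.nodup_ofList truths)
    (fun z hz => List.mem_append_left _ ((PySem.Set.mem_ofList truths z).1 hz)) hcard
  constructor
  · intro hx
    exact l2 (fun z hz => ⟨z, (PySem.Set.mem_ofList truths z).1 hz, Relation.ReflTransGen.refl⟩) x hx
  · rintro ⟨t, ht, path⟩
    induction path with
    | refl => exact l1 t ((PySem.Set.mem_ofList truths t).2 ht)
    | @tail b c path hstep ihp =>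
      obtain ⟨p, hp, hb, hc⟩ := hstep
      rcases l3 p hp with hd | hs
      · exact absurd hb ((PySem.Set.isdisjoint_iff _ p).1 hd b ihp)
      · exact (PySem.Set.issuperset_iff _ p).1 hs c hc

-- ---- counting ----

theorem solALie_iff (S : PySem.Dict Int Bool) (p : List Int) :
    solALie S p = true ↔ ∀ m ∈ p, ¬ amem S m := by
  induction p with
  | nil => simp [solALie]
  | cons m rest ih =>
    simp only [solALie]
    split_ifs with hm
    · constructor
      · intro h
        cases h
      · intro h
        exact absurd hm (h m (List.mem_cons_self ..))
    · rw [ih]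
      constructor
      · intro h m' hm'
        rcases List.mem_cons.1 hm' with rfl | hm''
        · exact hm
        · exact h m' hm''
      · intro h m' hm'
        exact h m' (List.mem_cons_of_mem _ hm')

theorem pass_nil (parties : List (List Int)) : solBPass [] parties = ([], false) := by
  rw [solBPass_eq]
  induction parties with
  | nil => rfl
  | cons p ps ih =>
    rw [List.foldl_cons]
    have hd : PySem.Set.isdisjoint ([] : PySem.Set Int) p = true :=
      (PySem.Set.isdisjoint_iff [] p).2 (by simp)
    have hb : bbody ([], false) p = ([], false) := by
      unfold bbody
      rw [hd]
      rfl
    rw [hb, ih]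

theorem loop_nil (parties : List (List Int)) (fuel : Nat) : solBLoop parties fuel [] = [] := by
  cases fuel with
  | zero => rfl
  | succ fuel =>
    simp only [solBLoop, pass_nil]
    rfl

-- ===== VERDICT (by name: the statement is the Claim_ definition above) =====
theorem solution_spec : Claim_equal_solution := by
  unfold Claim_equal_solution
  intro truths parties _
  unfold Spec_solution
  by_cases ht : truths = []
  · subst ht
    have hA : solution ([] : List Int) parties = PySem.List.len parties := by
      unfold solution
      rw [if_pos rfl]
    have hB : solution_alt ([] : List Int) parties = (parties.length : Int) := by
      show parties.foldl (fun acc party =>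
        if PySem.Set.isdisjoint (solBLoop parties
          (([] : List Int).length + (parties.map List.length).sum + 1)
          (PySem.Set.ofList ([] : List Int))) party then acc + 1 else acc) 0 = (parties.length : Int)
      have hof : PySem.Set.ofList ([] : List Int) = [] := rfl
      rw [hof, loop_nil]
      rw [PySem.List.foldl_if_add_one]
      have hcount : parties.countP (fun party => PySem.Set.isdisjoint [] party) = parties.length :=
        List.countP_eq_length.2 (fun p _ => (PySem.Set.isdisjoint_iff [] p).2 (by simp))
      rw [hcount]
      simp
    rw [hA, hB]
    simp [PySem.List.len_eq]
  · simp only [solution, solution_alt, if_neg ht]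
    apply PySem.List.foldl_congr_mem
    intro acc p hp
    have hiff : (solALie ((solABuild parties).1.keys.foldl
        (fun S m => solAFindAll (solABuild parties).2 ((parties.map List.length).sum + 1) S m)
        (truths.foldl (fun d k => d.insert k true) PySem.Dict.empty)) p = true) ↔
        (PySem.Set.isdisjoint (solBLoop parties
          (truths.length + (parties.map List.length).sum + 1) (PySem.Set.ofList truths)) p = true) := by
      rw [solALie_iff, PySem.Set.isdisjoint_iff]
      constructor
      · intro h x hx hxp
        exact h x hxp ((A_char truths parties x).2 ((B_char truths parties x).1 hx))
      · intro h m hm hamem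
        exact h m ((B_char truths parties m).2 ((A_char truths parties m).1 hamem)) hm
    rw [Bool.eq_iff_iff.2 hiff]
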